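-- pv_equiv track=rewrite | github.com/SauravSinha76/scaler2 | class31/max_and.py | solve
-- ===== SOURCE A (Python) =====
-- def checkBit(arr,bit):
--     count = 0
--     for a in arr:
--         if a & 1 << bit:
--             count += 1
--     return count
--
-- def solve(A):
--     res = 0
--     for bit in range(32,-1,-1):
--         count = checkBit(A,bit)
--
--         if count >= 4:
--             res |= 1 << bit
--
--             for i in range(len(A)):
--                 if not (A[i] & 1 << bit):
--                     A[i] = 0
--
--
--     return res
-- ===== SOURCE B (Python) =====
-- def solve(A):
--     res = 0
--     for bit in range(32, -1, -1):
--         cand = res | (1 << bit)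
--         count = 0
--         for a in A:
--             if a & cand == cand:
--                 count += 1
--         if count >= 4:
--             res = cand
--     # one final pass reproduces A's in-place zeroing exactly
--     for i in range(len(A)):
--         if A[i] & res != res:
--             A[i] = 0
--     return res
-- ===== Notes on version B (the rewrite author's own statement) =====
-- stated objective: faster
-- what changed: B never mutates the array during the bit scan: it keeps an accumulated prefix mask and counts original elements containing the whole candidate mask, then performs one final zeroing pass that reproduces A's in-place mutation.
import Mathlib
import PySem

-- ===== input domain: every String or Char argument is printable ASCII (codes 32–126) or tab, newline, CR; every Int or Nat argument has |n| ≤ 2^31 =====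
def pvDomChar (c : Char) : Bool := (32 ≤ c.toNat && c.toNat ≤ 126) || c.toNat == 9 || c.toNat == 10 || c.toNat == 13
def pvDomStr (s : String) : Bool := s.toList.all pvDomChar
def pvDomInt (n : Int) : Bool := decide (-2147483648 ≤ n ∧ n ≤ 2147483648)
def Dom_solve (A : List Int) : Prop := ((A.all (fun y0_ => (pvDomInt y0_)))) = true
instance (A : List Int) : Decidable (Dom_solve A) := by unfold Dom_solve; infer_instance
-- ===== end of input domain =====

-- B replaces A's repeated in-place zeroing during the bit scan by a pure prefix-mask count over
-- the original list plus one final zeroing pass (equivalence proved here is about the RETURN value;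
-- the Python B performs the identical observable mutation of A via its final pass).

-- ===== PORT A =====
def checkBit (arr : List Int) (bit : Int) : Int :=
  arr.foldl (fun count a => if Int.land a (1 <<< bit) ≠ 0 then count + 1 else count) 0

def stepA (st : List Int × Int) (bit : Int) : List Int × Int :=
  let count := checkBit st.1 bit
  if count ≥ 4 then
    (st.1.map (fun x => if Int.land x (1 <<< bit) = 0 then 0 else x),
     Int.lor st.2 (1 <<< bit))
  else st

def solve (A : List Int) : Int :=
  ((PySem.List.pyRange 32 (-1) (-1)).foldl stepA (A, 0)).2

-- ===== PORT B =====
def countB (A : List Int) (cand : Int) : Int :=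
  A.foldl (fun count a => if Int.land a cand = cand then count + 1 else count) 0

def stepB (A : List Int) (res bit : Int) : Int :=
  let cand := Int.lor res (1 <<< bit)
  if countB A cand ≥ 4 then cand else res

def solve_alt (A : List Int) : Int :=
  (PySem.List.pyRange 32 (-1) (-1)).foldl (stepB A) 0

-- ===== PRECONDITION & SPEC =====
def Spec_solve (A : List Int) (out : Int) : Prop := out = solve_alt A
instance (A : List Int) (out : Int) : Decidable (Spec_solve A out) := by unfold Spec_solve; infer_instance

-- ===== CLAIM (what is proved, stated in full; the proofs are below) =====
def Claim_equal_solve : Prop := ∀ (A : List Int), Dom_solve A → Spec_solve A (solve A)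

-- ===== LEMMAS AND PROOFS =====

/-- Two's-complement extensionality for `Int.testBit`. -/
theorem int_testBit_ext {a b : Int} (h : ∀ i, a.testBit i = b.testBit i) : a = b := by
  cases a with
  | ofNat m =>
    cases b with
    | ofNat n => exact congrArg Int.ofNat (Nat.eq_of_testBit_eq h)
    | negSucc n =>
      exfalso
      have h1 : Nat.testBit m (m + n) = false :=
        Nat.testBit_lt_two_pow (lt_of_le_of_lt (Nat.le_add_right m n)
          (lt_of_lt_of_le Nat.lt_two_pow_self (Nat.pow_le_pow_right (by omega) (by omega))))
      have h2 : Nat.testBit n (m + n) = false :=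
        Nat.testBit_lt_two_pow (lt_of_le_of_lt (Nat.le_add_left n m)
          (lt_of_lt_of_le Nat.lt_two_pow_self (Nat.pow_le_pow_right (by omega) (by omega))))
      have := h (m + n)
      simp [Int.testBit, h1, h2] at this
  | negSucc m =>
    cases b with
    | ofNat n =>
      exfalso
      have h1 : Nat.testBit m (m + n) = false :=
        Nat.testBit_lt_two_pow (lt_of_le_of_lt (Nat.le_add_right m n)
          (lt_of_lt_of_le Nat.lt_two_pow_self (Nat.pow_le_pow_right (by omega) (by omega))))
      have h2 : Nat.testBit n (m + n) = false :=
        Nat.testBit_lt_two_pow (lt_of_le_of_lt (Nat.le_add_left n m)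
          (lt_of_lt_of_le Nat.lt_two_pow_self (Nat.pow_le_pow_right (by omega) (by omega))))
      have := h (m + n)
      simp [Int.testBit, h1, h2] at this
    | negSucc n =>
      have : m = n := Nat.eq_of_testBit_eq (fun i => by
        have := h i
        simpa [Int.testBit] using this)
      exact congrArg Int.negSucc this

theorem tb_zero (i : Nat) : (0 : Int).testBit i = false := by
  simp [Int.testBit]

theorem land_zero_right (a : Int) : Int.land a 0 = 0 := by
  apply int_testBit_ext
  intro i
  simp [Int.testBit_land, tb_zero]

theorem shift_eq_pow {b : Int} (hb : 0 ≤ b) :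
    (1 : Int) <<< b = (((2 ^ b.toNat : Nat)) : Int) := by
  conv_lhs => rw [← Int.toNat_of_nonneg hb]
  exact Int.one_shiftLeft b.toNat

theorem tb_pow (k i : Nat) : (((2 ^ k : Nat) : Int)).testBit i = decide (k = i) := by
  show Nat.testBit (2 ^ k) i = decide (k = i)
  exact Nat.testBit_two_pow

/-- `a &&& 2^k` is `2^k` or `0` according to bit `k` of `a`. -/
theorem land_pow (a : Int) (k : Nat) :
    Int.land a ((2 ^ k : Nat) : Int) = if a.testBit k then ((2 ^ k : Nat) : Int) else 0 := by
  apply int_testBit_ext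
  intro i
  rw [Int.testBit_land, tb_pow]
  by_cases hik : k = i
  · subst hik
    cases h : a.testBit k
    · simp [tb_zero]
    · simp only [if_true, Bool.true_and]
      rw [tb_pow]; simp
  · cases h : a.testBit k
    · simp [tb_zero]
      exact fun _ => hik
    · simp only [if_true]
      rw [tb_pow]; simp [hik]

theorem land_pow_ne_zero (a : Int) (k : Nat) :
    (Int.land a ((2 ^ k : Nat) : Int) ≠ 0) ↔ a.testBit k = true := by
  rw [land_pow]
  cases h : a.testBit k <;> simp

/-- `a` contains mask `c` iff `a` has every bit of `c`. -/
theorem land_eq_self (a c : Int) :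
    Int.land a c = c ↔ ∀ i, c.testBit i = true → a.testBit i = true := by
  constructor
  · intro h i hc
    have := congrArg (fun x => x.testBit i) h
    simp only [Int.testBit_land, hc] at this
    simpa using this
  · intro h
    apply int_testBit_ext
    intro i
    rw [Int.testBit_land]
    cases hc : c.testBit i
    · simp
    · simp [h i hc]

/-- Splitting a containment test across a fresh single bit. -/
theorem land_lor_pow (a res : Int) (k : Nat) (_hres : res.testBit k = false) :
    Int.land a (Int.lor res ((2 ^ k : Nat) : Int)) = Int.lor res ((2 ^ k : Nat) : Int) ↔
      (Int.land a res = res ∧ a.testBit k = true) := by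
  rw [land_eq_self, land_eq_self]
  constructor
  · intro h
    refine ⟨fun i hi => h i ?_, h k ?_⟩
    · rw [Int.testBit_lor, hi]; simp
    · rw [Int.testBit_lor, tb_pow]; simp
  · rintro ⟨h1, h2⟩ i hi
    rw [Int.testBit_lor, tb_pow] at hi
    rcases Bool.or_eq_true_iff.mp hi with h | h
    · exact h1 i h
    · have : k = i := by simpa using h
      subst this; exact h2

/-- The element surviving A's zeroings so far, as a function of the accumulated mask. -/
def zmask (res a : Int) : Int := if Int.land a res = res then a else 0

/-- A's per-bit test on the zeroed array equals B's whole-mask test on the original element. -/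
theorem cond_eq (a res : Int) (k : Nat) (hres : res.testBit k = false) :
    (Int.land (zmask res a) ((2 ^ k : Nat) : Int) ≠ 0) ↔
      Int.land a (Int.lor res ((2 ^ k : Nat) : Int)) = Int.lor res ((2 ^ k : Nat) : Int) := by
  rw [land_lor_pow a res k hres, zmask]
  split_ifs with h
  · rw [land_pow_ne_zero]
    simp [h]
  · rw [land_pow_ne_zero]
    simp [h, tb_zero]

/-- A's zeroing step composed with the previous zeroings is the zeroing for the extended mask. -/
theorem zmask_step (a res : Int) (k : Nat) (hres : res.testBit k = false) :
    (if Int.land (zmask res a) ((2 ^ k : Nat) : Int) = 0 then 0 else zmask res a)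
      = zmask (Int.lor res ((2 ^ k : Nat) : Int)) a := by
  unfold zmask
  by_cases h1 : Int.land a res = res
  · rw [if_pos h1]
    by_cases hk : a.testBit k = true
    · have hm : Int.land a ((2 ^ k : Nat) : Int) ≠ 0 := (land_pow_ne_zero a k).mpr hk
      rw [if_neg hm, if_pos ((land_lor_pow a res k hres).mpr ⟨h1, hk⟩)]
    · have hm : Int.land a ((2 ^ k : Nat) : Int) = 0 := by
        rw [land_pow]
        simp only [Bool.not_eq_true] at hk
        simp [hk]
      rw [if_pos hm, if_neg (fun hc => hk ((land_lor_pow a res k hres).mp hc).2)]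
  · rw [if_neg h1]
    have h0 : Int.land (0 : Int) ((2 ^ k : Nat) : Int) = 0 := by
      rw [land_pow]; simp [tb_zero]
    rw [if_pos h0, if_neg (fun hc => h1 ((land_lor_pow a res k hres).mp hc).1)]

/-- The two counting folds agree pointwise, hence as folds. -/
theorem count_shift (res : Int) (k : Nat) (hres : res.testBit k = false)
    (t : List Int) (c : Int) :
    t.foldl (fun count a => if Int.land (zmask res a) ((2 ^ k : Nat) : Int) ≠ 0 then count + 1 else count) c
      = t.foldl (fun count a => if Int.land a (Int.lor res ((2 ^ k : Nat) : Int)) = Int.lor res ((2 ^ k : Nat) : Int) then count + 1 else count) c := by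
  induction t generalizing c with
  | nil => rfl
  | cons a t ih =>
    simp only [List.foldl_cons]
    have h := cond_eq a res k hres
    by_cases hc : Int.land a (Int.lor res ((2 ^ k : Nat) : Int))
        = Int.lor res ((2 ^ k : Nat) : Int)
    · rw [if_pos (h.mpr hc), if_pos hc]; exact ih _
    · rw [if_neg (fun hx => hc (h.mp hx)), if_neg hc]; exact ih _

theorem checkBit_eq_countB (A : List Int) (res b : Int) (hb : 0 ≤ b)
    (hres : res.testBit b.toNat = false) :
    checkBit (A.map (zmask res)) b = countB A (Int.lor res (1 <<< b)) := by
  unfold checkBit countB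
  rw [List.foldl_map, shift_eq_pow hb]
  exact count_shift res b.toNat hres A 0

theorem loop_eq (bs : List Int) (A : List Int) (res : Int)
    (hpos : ∀ b ∈ bs, 0 ≤ b)
    (hne : bs.Pairwise (· ≠ ·))
    (hdisj : ∀ b ∈ bs, res.testBit b.toNat = false) :
    (bs.foldl stepA (A.map (zmask res), res)).2 = bs.foldl (stepB A) res := by
  induction bs generalizing res with
  | nil => rfl
  | cons b t ih =>
    have hb : 0 ≤ b := hpos b (List.mem_cons_self ..)
    have hresb : res.testBit b.toNat = false := hdisj b (List.mem_cons_self ..)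
    simp only [List.foldl_cons]
    have hcount := checkBit_eq_countB A res b hb hresb
    show (t.foldl stepA (stepA (A.map (zmask res), res) b)).2 = t.foldl (stepB A) (stepB A res b)
    unfold stepA stepB
    simp only [hcount]
    by_cases hge : countB A (Int.lor res (1 <<< b)) ≥ 4
    · rw [if_pos hge, if_pos hge]
      have hmap : (A.map (zmask res)).map
          (fun x => if Int.land x (1 <<< b) = 0 then 0 else x)
            = A.map (zmask (Int.lor res (1 <<< b))) := by
        rw [List.map_map]
        apply List.map_congr_left
        intro a _
        show (if Int.land (zmask res a) (1 <<< b) = 0 then 0 else zmask res a) = _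
        rw [shift_eq_pow hb]
        exact zmask_step a res b.toNat hresb
      rw [hmap]
      apply ih _ (fun x hx => hpos x (List.mem_cons_of_mem _ hx)) hne.of_cons
      intro b' hb'
      rw [shift_eq_pow hb, Int.testBit_lor, hdisj b' (List.mem_cons_of_mem _ hb'), tb_pow]
      have hbb' : b ≠ b' := (List.pairwise_cons.mp hne).1 b' hb'
      have hb'0 : 0 ≤ b' := hpos b' (List.mem_cons_of_mem _ hb')
      have : b.toNat ≠ b'.toNat := by omega
      simp [this]
    · rw [if_neg hge, if_neg hge]
      exact ih _ (fun x hx => hpos x (List.mem_cons_of_mem _ hx)) hne.of_cons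
        (fun x hx => hdisj x (List.mem_cons_of_mem _ hx))

theorem zmask_zero (A : List Int) : A.map (zmask 0) = A := by
  apply List.map_congr_left ?_ |>.trans A.map_id
  intro a _
  simp [zmask, land_zero_right]

def pvBits : List Int :=
  [32,31,30,29,28,27,26,25,24,23,22,21,20,19,18,17,16,15,14,13,12,11,10,9,8,7,6,5,4,3,2,1,0]

set_option maxRecDepth 10000 in
theorem pyRange_bits : PySem.List.pyRange 32 (-1) (-1) = pvBits := by decide

theorem pvBits_pos : ∀ b ∈ pvBits, (0:Int) ≤ b := by decide

theorem pvBits_ne : pvBits.Pairwise (· ≠ ·) := by decide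

theorem pvBits_disj : ∀ b ∈ pvBits, (0:Int).testBit b.toNat = false := by decide

-- ===== VERDICT (by name: the statement is the Claim_ definition above) =====
set_option maxRecDepth 10000 in
theorem solve_spec : Claim_equal_solve := by
  intro A _
  show solve A = solve_alt A
  unfold solve solve_alt
  rw [pyRange_bits]
  conv_lhs => rw [← zmask_zero A]
  exact loop_eq pvBits A 0 pvBits_pos pvBits_ne pvBits_disj
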